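-- pv_equiv track=rewrite | github.com/HanKyeon/TIL-Today-I-Learned | SWEA/6190.py | danjoraise2
-- ===== SOURCE A (Python) =====
-- def danjoraise2(num) : #
--     c = num
--     ch = 9 # 10 나눗셈으로 계산하기 위해 반대로 1의 자리부터 확인해나간다.
--     while c > 0 :
--         if (c % 10) <= ch :
--             ch = c % 10
--             c = c // 10
--             continue
--         else :
--             return (-1)
--     return num
-- ===== SOURCE B (Python) =====
-- def danjoraise2(num):
--     # Two clearly separated passes: first extract all digits (least-significant
--     # first), then verify the collected sequence is non-increasing.
--     c = num
--     digits = []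
--     while c > 0:
--         digits.append(c % 10)
--         c = c // 10
--     if all(b <= a for a, b in zip(digits, digits[1:])):
--         return num
--     return -1
-- ===== Notes on version B (the rewrite author's own statement) =====
-- stated objective: alternative
-- what changed: A interleaves digit extraction with the monotonicity check in one while-loop with early return; B first collects all digits LSB-first into a list and then checks in a separate pass that adjacent digits are non-increasing.
import Mathlib
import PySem

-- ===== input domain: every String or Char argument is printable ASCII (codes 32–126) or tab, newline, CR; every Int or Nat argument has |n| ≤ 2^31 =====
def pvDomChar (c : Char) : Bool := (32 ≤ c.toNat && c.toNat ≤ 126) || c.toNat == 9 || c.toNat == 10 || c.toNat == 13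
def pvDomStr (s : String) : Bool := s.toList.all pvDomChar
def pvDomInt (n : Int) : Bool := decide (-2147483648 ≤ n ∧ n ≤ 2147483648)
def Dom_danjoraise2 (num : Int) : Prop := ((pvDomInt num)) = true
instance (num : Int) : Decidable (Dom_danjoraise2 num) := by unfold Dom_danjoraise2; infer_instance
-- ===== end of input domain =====

-- B separates A's single interleaved loop into two passes: collect the digits LSB-first, then check the list is non-increasing.


-- ===== PORT A =====
-- the while-loop: returns false when the 'return (-1)' branch fires, true when it exits normally.
-- fuel = c.toNat always suffices (c strictly decreases while positive); it only makes the recursion structural.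
def danjoraise2LoopA : Nat → Int → Int → Bool
  | 0, _, _ => true
  | fuel + 1, c, ch =>
    if c > 0 then
      if PySem.Int.mod c 10 ≤ ch then
        danjoraise2LoopA fuel (PySem.Int.floordiv c 10) (PySem.Int.mod c 10)
      else false
    else true

def danjoraise2 (num : Int) : Int :=
  if danjoraise2LoopA num.toNat num 9 then num else -1

-- ===== PORT B =====
-- first pass: collect digits, least significant first (same fuel convention)
def danjoraise2Digits : Nat → Int → List Int
  | 0, _ => []
  | fuel + 1, c =>
    if c > 0 then
      PySem.Int.mod c 10 :: danjoraise2Digits fuel (PySem.Int.floordiv c 10)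
    else []

-- second pass: all(b <= a for a, b in zip(digits, digits[1:]))
def danjoraise2NonInc (ds : List Int) : Bool :=
  (ds.zip ds.tail).all (fun p => p.2 ≤ p.1)

def danjoraise2_alt (num : Int) : Int :=
  if danjoraise2NonInc (danjoraise2Digits num.toNat num) then num else -1

-- ===== PRECONDITION & SPEC =====
def Spec_danjoraise2 (num : Int) (out : Int) : Prop := out = danjoraise2_alt num
instance (num : Int) (out : Int) : Decidable (Spec_danjoraise2 num out) := by unfold Spec_danjoraise2; infer_instance

-- ===== CLAIM (what is proved, stated in full; the proofs are below) =====
def Claim_equal_danjoraise2 : Prop := ∀ (num : Int), Dom_danjoraise2 num → Spec_danjoraise2 num (danjoraise2 num)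

-- ===== LEMMAS AND PROOFS =====

lemma danjoraise2_mod_le_nine (c : Int) : PySem.Int.mod c 10 ≤ 9 := by
  have := PySem.Int.mod_lt (a := c) (b := 10) (by norm_num)
  omega

lemma danjoraise2_fuel_step (c : Int) (fuel : Nat) (h : 0 < c) (hf : c.toNat ≤ fuel + 1) :
    (PySem.Int.floordiv c 10).toNat ≤ fuel := by
  have h10 : (0:Int) < 10 := by norm_num
  have := PySem.Int.floordiv_lt_iff_lt_mul (a := c) (b := 10) (q := c) h10
  have hnn : 0 ≤ PySem.Int.floordiv c 10 := by
    rw [PySem.Int.floordiv_eq_ediv_of_pos h10]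
    exact Int.ediv_nonneg (le_of_lt h) (by norm_num)
  omega

lemma danjoraise2_nonInc_cons (x : Int) (l : List Int) :
    danjoraise2NonInc (x :: l) =
      ((match l with | [] => true | y :: _ => decide (y ≤ x)) && danjoraise2NonInc l) := by
  cases l with
  | nil => simp [danjoraise2NonInc]
  | cons y rest => simp [danjoraise2NonInc]

-- the interleaved loop equals: head digit ≤ ch, and the digit list non-increasing
lemma danjoraise2_loop_eq (fuel : Nat) (c ch : Int) (hf : c.toNat ≤ fuel) :
    danjoraise2LoopA fuel c ch =
      ((match danjoraise2Digits fuel c with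
        | [] => true
        | d :: _ => decide (d ≤ ch)) && danjoraise2NonInc (danjoraise2Digits fuel c)) := by
  induction fuel generalizing c ch with
  | zero => simp [danjoraise2LoopA, danjoraise2Digits, danjoraise2NonInc]
  | succ fuel ih =>
    by_cases h : c > 0
    · by_cases hle : PySem.Int.mod c 10 ≤ ch
      · rw [danjoraise2LoopA, danjoraise2Digits]
        simp only [if_pos h, if_pos hle]
        rw [ih _ _ (danjoraise2_fuel_step c fuel h hf), danjoraise2_nonInc_cons]
        rw [PySem.Int.mod_eq_emod_of_pos (by norm_num)] at hle
        simp [hle]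
      · rw [danjoraise2LoopA, danjoraise2Digits]
        simp only [if_pos h, if_neg hle]
        rw [PySem.Int.mod_eq_emod_of_pos (by norm_num)] at hle
        simp [hle]
    · rw [danjoraise2LoopA, danjoraise2Digits]
      simp [h, danjoraise2NonInc]

-- ===== VERDICT (by name: the statement is the Claim_ definition above) =====
theorem danjoraise2_spec : Claim_equal_danjoraise2 := by
  intro num _
  show _ = _
  unfold danjoraise2 danjoraise2_alt
  rw [danjoraise2_loop_eq num.toNat num 9 (le_refl _)]
  cases hd : danjoraise2Digits num.toNat num with
  | nil => simp
  | cons d rest =>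
    have hdle : d ≤ 9 := by
      cases hfuel : num.toNat with
      | zero => rw [hfuel] at hd; simp [danjoraise2Digits] at hd
      | succ fuel =>
        rw [hfuel, danjoraise2Digits] at hd
        by_cases h : num > 0
        · simp only [if_pos h, List.cons.injEq] at hd
          have := danjoraise2_mod_le_nine num
          omega
        · simp [h] at hd
    simp [hdle]
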